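-- pv_equiv track=rewrite | github.com/More-Classy/ML-BUSINESS-API | app/services/onboarding_service.py | _clean_description_formatting
-- ===== SOURCE A (Python) =====
-- def _clean_description_formatting(description: str) -> str:
--     """Clean and properly format the description text"""
--     # Remove any escaped characters
--     description = description.replace('\\n', '<br><br>')
--     description = description.replace('\\n', '\n')
--     description = description.replace('\\\\', '\\')
--
--     # Split into sentences and rejoin properly
--     sentences = [s.strip() for s in description.split('.') if s.strip()]
--
--     # Group sentences into paragraphs (roughly 2-3 sentences per paragraph)
--     paragraphs = []
--     current_paragraph = []
--
--     for i, sentence in enumerate(sentences):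
--         current_paragraph.append(sentence)
--
--         # Create paragraph break every 2-3 sentences
--         if len(current_paragraph) >= 2 and (i == len(sentences) - 1 or len(current_paragraph) == 3):
--             paragraphs.append('. '.join(current_paragraph) + '.')
--             current_paragraph = []
--
--     # Add any remaining sentences
--     if current_paragraph:
--         paragraphs.append('. '.join(current_paragraph) + '.')
--
--     # Join paragraphs with actual line breaks (not escaped)
--     cleaned_description = '\n\n'.join(paragraphs)
--
--     return cleaned_description
-- ===== SOURCE B (Python) =====
-- def _clean_description_formatting(description: str) -> str:
--     """Clean and properly format the description text"""
--     description = description.replace('\\n', '<br><br>')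
--     description = description.replace('\\n', '\n')
--     description = description.replace('\\\\', '\\')
--
--     sentences = [s.strip() for s in description.split('.') if s.strip()]
--
--     # Chunk sentences into consecutive groups of 3 by slicing (the last
--     # group keeps the remainder), instead of an accumulator/flush loop.
--     chunks = [sentences[i:i + 3] for i in range(0, len(sentences), 3)]
--     paragraphs = ['. '.join(chunk) + '.' for chunk in chunks]
--     return '\n\n'.join(paragraphs)
-- ===== Notes on version B (the rewrite author's own statement) =====
-- stated objective: simpler
-- what changed: The accumulator/counter/flush paragraph loop (with its last-index and post-loop remainder special cases) is replaced by direct index slicing into groups of 3 and a join per group.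
import Mathlib
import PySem

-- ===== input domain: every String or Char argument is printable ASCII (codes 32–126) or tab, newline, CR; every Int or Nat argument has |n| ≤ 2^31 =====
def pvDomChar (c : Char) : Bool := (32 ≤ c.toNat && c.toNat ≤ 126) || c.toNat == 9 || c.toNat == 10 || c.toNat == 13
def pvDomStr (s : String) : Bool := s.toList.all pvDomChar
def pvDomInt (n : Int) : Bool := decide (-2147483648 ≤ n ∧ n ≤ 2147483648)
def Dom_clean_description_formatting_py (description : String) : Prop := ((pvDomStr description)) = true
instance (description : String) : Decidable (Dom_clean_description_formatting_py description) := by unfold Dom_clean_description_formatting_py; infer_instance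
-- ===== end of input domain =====

-- B replaces A's accumulator/counter/flush paragraph loop by slicing the sentence list
-- into consecutive groups of 3 (objective: simpler).

-- ===== PORT A =====
-- the loop body of A's `for i, sentence in enumerate(sentences)` (n = len(sentences))
def pvFlushLoop (n : Int) (st : List String × List String) (p : Int × String) :
    List String × List String :=
  let cur := st.2 ++ [p.2]
  if 2 ≤ cur.length ∧ (p.1 = n - 1 ∨ cur.length = 3)
  then (st.1 ++ [PySem.Str.join ". " cur ++ "."], [])
  else (st.1, cur)

def clean_description_formatting_py (description : String) : String :=
  let d1 := PySem.Str.replace description "\\n" "<br><br>"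
  let d2 := PySem.Str.replace d1 "\\n" "\n"
  let d3 := PySem.Str.replace d2 "\\\\" "\\"
  let sentences :=
    (((PySem.Str.split? d3 ".").getD []).filter
      (fun s => PySem.Str.strip s != "")).map PySem.Str.strip
  let n : Int := sentences.length
  let st := (PySem.List.enumerate sentences).foldl (pvFlushLoop n) ([], [])
  let paragraphs :=
    if st.2.isEmpty then st.1 else st.1 ++ [PySem.Str.join ". " st.2 ++ "."]
  PySem.Str.join "\n\n" paragraphs

-- ===== PORT B =====
def clean_description_formatting_py_alt (description : String) : String :=
  let d1 := PySem.Str.replace description "\\n" "<br><br>"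
  let d2 := PySem.Str.replace d1 "\\n" "\n"
  let d3 := PySem.Str.replace d2 "\\\\" "\\"
  let sentences :=
    (((PySem.Str.split? d3 ".").getD []).filter
      (fun s => PySem.Str.strip s != "")).map PySem.Str.strip
  let chunks := (PySem.List.pyRange 0 sentences.length 3).map
    (fun i => PySem.List.slice sentences (some i) (some (i + 3)))
  let paragraphs := chunks.map (fun c => PySem.Str.join ". " c ++ ".")
  PySem.Str.join "\n\n" paragraphs

-- ===== PRECONDITION & SPEC =====
def Spec_clean_description_formatting_py (description : String) (out : String) : Prop := out = clean_description_formatting_py_alt description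
instance (description : String) (out : String) : Decidable (Spec_clean_description_formatting_py description out) := by unfold Spec_clean_description_formatting_py; infer_instance

-- ===== CLAIM (what is proved, stated in full; the proofs are below) =====
def Claim_equal_clean_description_formatting_py : Prop := ∀ (description : String), Dom_clean_description_formatting_py description → Spec_clean_description_formatting_py description (clean_description_formatting_py description)

-- ===== LEMMAS AND PROOFS =====

-- groups of 3 consecutive elements, last group holds the remainder
def pvChunk3 {α : Type} : List α → List (List α)
  | [] => []
  | [a] => [[a]]
  | [a, b] => [[a, b]]
  | a :: b :: c :: t => [a, b, c] :: pvChunk3 t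

-- A's loop flushes exactly the consecutive groups of 3 (remainder after the loop)
theorem pvFlushLoop_eq (l : List String) : ∀ (N k : Int) (acc : List String),
    N = k + l.length →
    (let st := (PySem.List.enumerate l k).foldl (pvFlushLoop N) (acc, [])
     if st.2.isEmpty then st.1 else st.1 ++ [PySem.Str.join ". " st.2 ++ "."]) =
      acc ++ (pvChunk3 l).map (fun c => PySem.Str.join ". " c ++ ".") := by
  match l with
  | [] => intro N k acc h; simp [PySem.List.enumerate, pvChunk3]
  | [a] => intro N k acc h; simp [PySem.List.enumerate, pvFlushLoop, pvChunk3]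
  | [a, b] =>
      intro N k acc h
      have hk : k + 1 = N - 1 := by simp at h; omega
      simp [PySem.List.enumerate, pvFlushLoop, pvChunk3, hk]
  | a :: b :: c :: t =>
      intro N k acc h
      have hk2 : ¬ (k + 1 = N - 1) := by simp at h; omega
      have hstep : pvFlushLoop N (pvFlushLoop N (pvFlushLoop N (acc, []) (k, a)) (k + 1, b)) (k + 1 + 1, c)
          = (acc ++ [PySem.Str.join ". " [a, b, c] ++ "."], []) := by
        simp [pvFlushLoop, hk2]
      have IH := pvFlushLoop_eq t N (k + 1 + 1 + 1)
        (acc ++ [PySem.Str.join ". " [a, b, c] ++ "."]) (by simp at h ⊢; omega)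
      simp only [PySem.List.enumerate, List.foldl] at IH ⊢
      rw [hstep, IH]
      simp [pvChunk3]
termination_by l.length
decreasing_by simp; omega

-- B's slicing over range(0, len, 3) produces the same groups of 3 (Nat form)
theorem pvSlices_nat_eq {α : Type} (l : List α) :
    (List.range ((l.length + 2) / 3)).map (fun m => (l.drop (3 * m)).take 3) = pvChunk3 l := by
  match l with
  | [] => simp [pvChunk3]
  | [a] => simp [pvChunk3, List.range_succ]
  | [a, b] => simp [pvChunk3, List.range_succ]
  | a :: b :: c :: t =>
      have hlen : ((a :: b :: c :: t).length + 2) / 3 = (t.length + 2) / 3 + 1 := by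
        simp; omega
      rw [hlen, List.range_succ_eq_map, List.map_cons, List.map_map]
      have hcomp : (fun m => ((a :: b :: c :: t).drop (3 * m)).take 3) ∘ Nat.succ
          = fun m => (t.drop (3 * m)).take 3 := by
        funext m
        simp only [Function.comp]
        rw [show 3 * (m + 1) = 3 * m + 1 + 1 + 1 by ring]
        simp [List.drop_succ_cons]
      rw [hcomp, pvSlices_nat_eq t]
      simp [pvChunk3]

-- B's Int-indexed pyRange/slice form reduces to the Nat form
theorem pvSlices_eq (l : List String) :
    (PySem.List.pyRange 0 l.length 3).map
      (fun i => PySem.List.slice l (some i) (some (i + 3))) = pvChunk3 l := by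
  rw [PySem.List.pyRange_of_pos 0 (l.length : Int) (by norm_num), List.map_map]
  have hcnt : (if (0 : Int) < l.length then (((l.length : Int) - 0 + 3 - 1) / 3).toNat else 0)
      = (l.length + 2) / 3 := by
    split_ifs with h
    · omega
    · omega
  rw [hcnt]
  rw [← pvSlices_nat_eq l]
  apply List.map_congr_left
  intro m _
  simp only [Function.comp]
  have e1 : (0 : Int) + 3 * (m : Int) = ((3 * m : Nat) : Int) := by push_cast; ring
  rw [e1, show ((3 * m : Nat) : Int) + 3 = ((3 * m : Nat) : Int) + ((3 : Nat) : Int) by norm_num,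
    PySem.List.slice_natCast_add]

-- ===== VERDICT (by name: the statement is the Claim_ definition above) =====
-- the two ports agree as functions of the shared sentence list
theorem pvMain (sentences : List String) :
    PySem.Str.join "\n\n"
      (let st := (PySem.List.enumerate sentences).foldl
        (pvFlushLoop (sentences.length : Int)) ([], [])
       if st.2.isEmpty then st.1 else st.1 ++ [PySem.Str.join ". " st.2 ++ "."]) =
    PySem.Str.join "\n\n"
      (((PySem.List.pyRange 0 sentences.length 3).map
        (fun i => PySem.List.slice sentences (some i) (some (i + 3)))).map
        (fun c => PySem.Str.join ". " c ++ ".")) := by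
  congr 1
  rw [pvSlices_eq]
  have := pvFlushLoop_eq sentences (sentences.length : Int) 0 [] (by simp)
  simpa using this

theorem clean_description_formatting_py_spec : Claim_equal_clean_description_formatting_py := by
  intro description _
  exact pvMain _
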